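-- pv_equiv track=rewrite | github.com/Mzhongwei/Energy-Aware-Entity-Resolution | comparison_approaches/exact_matching_copy.py | compare_group
-- ===== SOURCE A (Python) =====
-- def update_pairs_list(id_a, id_b, list_pairs, index_pairs):
--     updated = False
--     for pair in list_pairs:
--         if id_a in pair or id_b in pair:
--             pair.update([id_a, id_b])
--             updated = True
--             break
--     if not updated:
--         list_pairs.append({id_a, id_b})
--     index_pairs.update([id_a, id_b])
--     return list_pairs, index_pairs
--
-- def compare_group(group):
--     local_pairs = []
--     local_index = set()
--     n = len(group)
--     for i in range(n - 1):
--         rid_i, tokens_i = group[i]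
--         for j in range(i + 1, n):
--             rid_j, tokens_j = group[j]
--             if tokens_i == tokens_j:
--                 local_pairs, local_index = update_pairs_list(rid_i, rid_j, local_pairs, local_index)
--     return local_pairs, local_index
-- ===== SOURCE B (Python) =====
-- def compare_group(group):
--     by_tokens = {}
--     for rid, tokens in group:
--         key = tuple(tokens)
--         by_tokens[key] = by_tokens.get(key, []) + [rid]
--     pairs = []
--     index = set()
--     for rids in by_tokens.values():
--         if len(rids) >= 2:
--             pairs.append(set(rids))
--             index.update(rids)
--     return pairs, index
-- ===== Notes on version B (the rewrite author's own statement) =====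
-- stated objective: alternative
-- what changed: B replaces A's all-pairs comparison with incremental pair-set merging by a single dict pass that groups record ids by token list and then emits each group with >=2 records in first-occurrence order.
import Mathlib
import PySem

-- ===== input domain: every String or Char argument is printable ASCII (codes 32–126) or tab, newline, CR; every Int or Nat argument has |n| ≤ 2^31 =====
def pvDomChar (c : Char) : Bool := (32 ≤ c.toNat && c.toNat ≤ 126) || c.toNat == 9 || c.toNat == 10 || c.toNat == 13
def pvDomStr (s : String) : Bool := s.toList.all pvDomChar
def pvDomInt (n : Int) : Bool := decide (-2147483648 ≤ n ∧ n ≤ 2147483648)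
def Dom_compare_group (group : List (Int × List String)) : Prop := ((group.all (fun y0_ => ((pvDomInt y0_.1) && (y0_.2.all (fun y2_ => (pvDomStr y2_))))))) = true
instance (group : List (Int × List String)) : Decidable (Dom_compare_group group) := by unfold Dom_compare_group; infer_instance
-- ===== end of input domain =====

-- B hash-groups the records by token list in one dict pass and emits each group of ≥2 records
-- once, instead of A's all-pairs scan with incremental pair-set merging (objective: alternative).
-- A mutates no argument; the equivalence is about the return value.

-- ===== PORT A =====
-- 'for pair in list_pairs: if id_a in pair or id_b in pair: pair.update([id_a,id_b]); break'
-- (none = no pair matched, so the caller appends a fresh {id_a, id_b})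
def uplLoop (a b : Int) : List (PySem.Set Int) → Option (List (PySem.Set Int))
  | [] => none
  | p :: ps =>
    if PySem.Set.contains p a || PySem.Set.contains p b then
      some (PySem.Set.update p [a, b] :: ps)
    else (uplLoop a b ps).map (p :: ·)

def update_pairs_list (a b : Int) (pairs : List (PySem.Set Int)) (index : PySem.Set Int) :
    List (PySem.Set Int) × PySem.Set Int :=
  let pairs' :=
    match uplLoop a b pairs with
    | some l => l
    | none => pairs ++ [PySem.Set.ofList [a, b]]
  (pairs', PySem.Set.update index [a, b])

-- inner loop 'for j in range(i+1, n)' over the records after record i, as structural recursion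
def cgInner (ri : Int) (ti : List String) :
    List (Int × List String) → List (PySem.Set Int) × PySem.Set Int →
    List (PySem.Set Int) × PySem.Set Int
  | [], st => st
  | (rj, tj) :: rest, st =>
    cgInner ri ti rest (if ti == tj then update_pairs_list ri rj st.1 st.2 else st)

-- outer loop 'for i in range(n - 1)' (running i = n-1 as well changes nothing: its inner range is empty)
def cgOuter : List (Int × List String) → List (PySem.Set Int) × PySem.Set Int →
    List (PySem.Set Int) × PySem.Set Int
  | [], st => st
  | (ri, ti) :: rest, st => cgOuter rest (cgInner ri ti rest st)

def compare_group (group : List (Int × List String)) : List (List Int) × List Int :=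
  cgOuter group ([], PySem.Set.empty)

-- ===== PORT B =====
-- 'by_tokens[key] = by_tokens.get(key, []) + [rid]' over the whole list, then one pass over the values
def compare_group_alt (group : List (Int × List String)) : List (List Int) × List Int :=
  let d := group.foldl (fun d rt => d.modify rt.2 [] (· ++ [rt.1])) PySem.Dict.empty
  d.values.foldl
    (fun st rids =>
      if 2 ≤ rids.length then
        (st.1 ++ [PySem.Set.ofList rids], PySem.Set.update st.2 rids)
      else st)
    ([], PySem.Set.empty)

-- ===== PRECONDITION & SPEC =====
-- Pre_ excludes inputs where one record id occurs with two different token lists that both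
-- have at least two records: there A's first-matching-pair update accidentally couples the two
-- otherwise unrelated token groups, an artefact of scanning list_pairs, while B keeps the
-- token groups separate; both behaviours are defensible on such duplicate-id inputs.
def Pre_compare_group (group : List (Int × List String)) : Prop :=
  ∀ a ∈ group, ∀ b ∈ group, a.1 = b.1 → a.2 ≠ b.2 →
    (group.filter (fun rt => rt.2 == a.2)).length ≤ 1 ∨
    (group.filter (fun rt => rt.2 == b.2)).length ≤ 1
instance (group : List (Int × List String)) : Decidable (Pre_compare_group group) := by
  unfold Pre_compare_group; infer_instance

def pvWitness_compare_group : (List (Int × List String)) :=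
  [(1, ["a"]), (2, ["a"]), (3, ["b"])]

def Spec_compare_group (group : List (Int × List String)) (out : List (List Int) × List Int) : Prop := out = compare_group_alt group
instance (group : List (Int × List String)) (out : List (List Int) × List Int) : Decidable (Spec_compare_group group out) := by unfold Spec_compare_group; infer_instance

-- ===== CLAIM (what is proved, stated in full; the proofs are below) =====
def Claim_equal_compare_group : Prop := ∀ (group : List (Int × List String)), Dom_compare_group group → Pre_compare_group group → Spec_compare_group group (compare_group group)

-- ===== LEMMAS AND PROOFS =====

-- rids of the records carrying token list t, in record order
def ridsOf (g : List (Int × List String)) (t : List String) : List Int :=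
  (g.filter (fun rt => rt.2 == t)).map (·.1)

-- the distinct token lists in first-occurrence order
def toksOf (g : List (Int × List String)) : List (List String) :=
  PySem.Set.ofList (g.map (·.2))

-- the equivalence classes A has not yet built: tokens of g, not yet covered by cs, with ≥ 2 records
def canonNew (g : List (Int × List String)) (cs : List (List String × List Int)) :
    List (List String × List Int) :=
  ((toksOf g).filter
      (fun t => !(cs.any (·.1 == t)) && decide (2 ≤ (ridsOf g t).length))).map
    (fun t => (t, PySem.Set.ofList (ridsOf g t)))

def renderCls (cs : List (List String × List Int)) : List (List Int) × List Int :=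
  (cs.map (·.2), (cs.map (·.2)).flatten)

lemma ridsOf_length (g : List (Int × List String)) (t : List String) :
    (ridsOf g t).length = (g.filter (fun rt => rt.2 == t)).length := by
  simp [ridsOf]

lemma filter_cons_len {rt : Int × List String} {g' : List (Int × List String)}
    {p : Int × List String → Bool} :
    (g'.filter p).length ≤ ((rt :: g').filter p).length := by
  rw [List.filter_cons]
  split <;> simp

lemma pre_tail {rt : Int × List String} {g' : List (Int × List String)}
    (h : Pre_compare_group (rt :: g')) : Pre_compare_group g' := by
  intro a ha b hb h1 h2
  rcases h a (by simp [ha]) b (by simp [hb]) h1 h2 with hc | hc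
  · exact Or.inl (le_trans filter_cons_len hc)
  · exact Or.inr (le_trans filter_cons_len hc)

lemma ridsOf_len_mono {rt : Int × List String} {g' : List (Int × List String)}
    {y : List String} : (ridsOf g' y).length ≤ (ridsOf (rt :: g') y).length := by
  rw [ridsOf_length, ridsOf_length]
  exact filter_cons_len

lemma update_subset {s : PySem.Set Int} {xs : List Int} (h : ∀ x ∈ xs, x ∈ s) :
    PySem.Set.update s xs = s := by
  rw [PySem.Set.update_eq_append_filter]
  simpa using h

lemma uplLoop_none {a b : Int} {ps : List (PySem.Set Int)}
    (h : ∀ p ∈ ps, a ∉ p ∧ b ∉ p) : uplLoop a b ps = none := by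
  induction ps with
  | nil => rfl
  | cons p ps ih =>
    have hp := h p (by simp)
    simp [uplLoop, hp.1, hp.2, ih (fun q hq => h q (by simp [hq]))]

lemma uplLoop_noop {a b : Int} {ps : List (PySem.Set Int)}
    (h1 : ∀ p ∈ ps, (a ∈ p ∨ b ∈ p) → (a ∈ p ∧ b ∈ p))
    (h2 : ∃ p ∈ ps, a ∈ p) : uplLoop a b ps = some ps := by
  induction ps with
  | nil => simp at h2
  | cons p ps ih =>
    by_cases hab : a ∈ p ∨ b ∈ p
    · have hb := h1 p (by simp) hab
      have hupd : PySem.Set.update p [a, b] = p :=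
        update_subset (by intro x hx; simp at hx; rcases hx with rfl | rfl; exacts [hb.1, hb.2])
      simp [uplLoop, hb.1, hupd]
    · rw [not_or] at hab
      have h2' : ∃ q ∈ ps, a ∈ q := by
        rcases h2 with ⟨q, hq, hqa⟩
        rcases List.mem_cons.mp hq with rfl | hq'
        · exact absurd hqa hab.1
        · exact ⟨q, hq', hqa⟩
      simp [uplLoop, hab.1, hab.2, ih (fun q hq => h1 q (by simp [hq])) h2']

lemma uplLoop_last {a b : Int} {cs : List (PySem.Set Int)} {q : PySem.Set Int}
    (h : ∀ p ∈ cs, a ∉ p ∧ b ∉ p) (ha : a ∈ q) :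
    uplLoop a b (cs ++ [q]) = some (cs ++ [PySem.Set.add q b]) := by
  induction cs with
  | nil =>
    have hupd : PySem.Set.update q [a, b] = PySem.Set.add q b := by
      simp [PySem.Set.update_cons, PySem.Set.update_nil, PySem.Set.add_of_mem ha]
    simp [uplLoop, ha, hupd]
  | cons p ps ih =>
    have hp := h p (by simp)
    simp [uplLoop, hp.1, hp.2, ih (fun r hr => h r (by simp [hr]))]

lemma cgInner_noop (ri : Int) (ti : List String) :
    ∀ (g' : List (Int × List String)) (ps : List (PySem.Set Int)) (ix : PySem.Set Int),
    (∀ rt ∈ g', rt.2 = ti → update_pairs_list ri rt.1 ps ix = (ps, ix)) →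
    cgInner ri ti g' (ps, ix) = (ps, ix) := by
  intro g'
  induction g' with
  | nil => intro ps ix _; rfl
  | cons rt rest ih =>
    intro ps ix h
    obtain ⟨rj, tj⟩ := rt
    by_cases he : ti == tj
    · have : update_pairs_list ri rj ps ix = (ps, ix) :=
        h (rj, tj) (by simp) (eq_of_beq he).symm
      simp [cgInner, he, this, ih ps ix (fun q hq hq2 => h q (by simp [hq]) hq2)]
    · simp [cgInner, he, ih ps ix (fun q hq hq2 => h q (by simp [hq]) hq2)]

lemma cgInner_build (ri : Int) (ti : List String) :
    ∀ (g' : List (Int × List String)) (cs : List (PySem.Set Int)) (part : PySem.Set Int),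
    (∀ rt ∈ g', rt.2 = ti → ∀ p ∈ cs, rt.1 ∉ p) →
    (∀ p ∈ cs, ri ∉ p) →
    ri ∈ part →
    cgInner ri ti g' (cs ++ [part], cs.flatten ++ part) =
      (cs ++ [PySem.Set.update part (ridsOf g' ti)],
       cs.flatten ++ PySem.Set.update part (ridsOf g' ti)) := by
  intro g'
  induction g' with
  | nil => intro cs part _ _ _; simp [cgInner, ridsOf, PySem.Set.update_nil]
  | cons rt rest ih =>
    intro cs part hnew hri hmem
    obtain ⟨rj, tj⟩ := rt
    by_cases he : (ti == tj) = true
    · have htj : tj = ti := (eq_of_beq he).symm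
      have hrj_out : ∀ p ∈ cs, rj ∉ p := hnew (rj, tj) (by simp) htj
      have hloop := uplLoop_last (a := ri) (b := rj) (cs := cs) (q := part)
        (fun p hp => ⟨hri p hp, hrj_out p hp⟩) hmem
      have hix : PySem.Set.update (cs.flatten ++ part) [ri, rj] =
          cs.flatten ++ PySem.Set.add part rj := by
        have hmem' : ri ∈ cs.flatten ++ part := by simp [hmem]
        rw [PySem.Set.update_cons, PySem.Set.add_of_mem hmem', PySem.Set.update_cons,
            PySem.Set.update_nil]
        by_cases hrj : rj ∈ part
        · rw [PySem.Set.add_of_mem (by simp [hrj]), PySem.Set.add_of_mem hrj]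
        · have hout : rj ∉ cs.flatten ++ part := by
            simp only [List.mem_append]
            rintro (hf | hp)
            · obtain ⟨p, hpcs, hrp⟩ := List.mem_flatten.mp hf
              exact hrj_out p hpcs hrp
            · exact hrj hp
          rw [PySem.Set.add_of_not_mem hout, PySem.Set.add_of_not_mem hrj, List.append_assoc]
      have hst : update_pairs_list ri rj (cs ++ [part]) (cs.flatten ++ part) =
          (cs ++ [PySem.Set.add part rj], cs.flatten ++ PySem.Set.add part rj) := by
        simp [update_pairs_list, hloop, hix]
      have hrec := ih cs (PySem.Set.add part rj)
        (fun q hq hq2 p hp => hnew q (by simp [hq]) hq2 p hp)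
        hri (by simp [PySem.Set.mem_add, hmem])
      have hridscons : ridsOf ((rj, tj) :: rest) ti = rj :: ridsOf rest ti := by
        simp [ridsOf, htj]
      calc cgInner ri ti ((rj, tj) :: rest) (cs ++ [part], cs.flatten ++ part)
          = cgInner ri ti rest (cs ++ [PySem.Set.add part rj],
              cs.flatten ++ PySem.Set.add part rj) := by
            simp [cgInner, he, hst]
        _ = _ := by rw [hrec, hridscons, PySem.Set.update_cons]
    · have hne : tj ≠ ti := fun h => he (by simp [h])
      have hrids : ridsOf ((rj, tj) :: rest) ti = ridsOf rest ti := by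
        simp [ridsOf, hne]
      have hrec := ih cs part (fun q hq hq2 p hp => hnew q (by simp [hq]) hq2 p hp) hri hmem
      simp [cgInner, he, hrec, hrids]

lemma cgInner_create (ri : Int) (ti : List String) :
    ∀ (g' : List (Int × List String)) (cs : List (PySem.Set Int)),
    (∀ rt ∈ g', rt.2 = ti → ∀ p ∈ cs, rt.1 ∉ p) →
    (∀ p ∈ cs, ri ∉ p) →
    cgInner ri ti g' (cs, cs.flatten) =
      (if ridsOf g' ti = [] then (cs, cs.flatten)
       else (cs ++ [PySem.Set.ofList (ri :: ridsOf g' ti)],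
             cs.flatten ++ PySem.Set.ofList (ri :: ridsOf g' ti))) := by
  intro g'
  induction g' with
  | nil => intro cs _ _; simp [cgInner, ridsOf]
  | cons rt rest ih =>
    intro cs hnew hri
    obtain ⟨rj, tj⟩ := rt
    by_cases he : (ti == tj) = true
    · have htj : tj = ti := (eq_of_beq he).symm
      have hrj_out : ∀ p ∈ cs, rj ∉ p := hnew (rj, tj) (by simp) htj
      have hloop : uplLoop ri rj cs = none :=
        uplLoop_none (fun p hp => ⟨hri p hp, hrj_out p hp⟩)
      have hriout : ri ∉ cs.flatten := by
        intro hf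
        obtain ⟨p, hpcs, hrp⟩ := List.mem_flatten.mp hf
        exact hri p hpcs hrp
      have hix : PySem.Set.update cs.flatten [ri, rj] =
          cs.flatten ++ PySem.Set.ofList [ri, rj] := by
        rw [PySem.Set.update_cons, PySem.Set.add_of_not_mem hriout, PySem.Set.update_cons,
            PySem.Set.update_nil]
        by_cases hrj : rj = ri
        · subst hrj
          rw [PySem.Set.add_of_mem (by simp)]
          simp [PySem.Set.ofList_cons, PySem.Set.discard]
        · have hout : rj ∉ cs.flatten ++ [ri] := by
            simp only [List.mem_append, List.mem_singleton]
            rintro (hf | rfl)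
            · obtain ⟨p, hpcs, hrp⟩ := List.mem_flatten.mp hf
              exact hrj_out p hpcs hrp
            · exact hrj rfl
          rw [PySem.Set.add_of_not_mem hout, List.append_assoc,
              PySem.Set.ofList_eq_self_of_nodup (xs := [ri, rj]) (by simp [Ne.symm hrj])]
          simp
      have hst : update_pairs_list ri rj cs cs.flatten =
          (cs ++ [PySem.Set.ofList [ri, rj]], cs.flatten ++ PySem.Set.ofList [ri, rj]) := by
        simp [update_pairs_list, hloop, hix]
      have hrec := cgInner_build ri ti rest cs (PySem.Set.ofList [ri, rj])
        (fun q hq hq2 p hp => hnew q (by simp [hq]) hq2 p hp)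
        hri (by simp [PySem.Set.mem_ofList])
      have hridscons : ridsOf ((rj, tj) :: rest) ti = rj :: ridsOf rest ti := by
        simp [ridsOf, htj]
      have hS : PySem.Set.update (PySem.Set.ofList [ri, rj]) (ridsOf rest ti) =
          PySem.Set.ofList (ri :: rj :: ridsOf rest ti) := by
        rw [show (ri :: rj :: ridsOf rest ti) = [ri, rj] ++ ridsOf rest ti from rfl,
            PySem.Set.ofList_append]
      calc cgInner ri ti ((rj, tj) :: rest) (cs, cs.flatten)
          = cgInner ri ti rest (cs ++ [PySem.Set.ofList [ri, rj]],
              cs.flatten ++ PySem.Set.ofList [ri, rj]) := by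
            simp [cgInner, he, hst]
        _ = _ := by rw [hrec, hS, hridscons]; simp
    · have hne : tj ≠ ti := fun h => he (by simp [h])
      have hrids : ridsOf ((rj, tj) :: rest) ti = ridsOf rest ti := by
        simp [ridsOf, hne]
      have hrec := ih cs (fun q hq hq2 p hp => hnew q (by simp [hq]) hq2 p hp) hri
      simp [cgInner, he, hrec, hrids]

lemma mem_ridsOf {g : List (Int × List String)} {y : List String} {x : Int} :
    x ∈ ridsOf g y ↔ ∃ rt ∈ g, rt.1 = x ∧ rt.2 = y := by
  simp only [ridsOf, List.mem_map, List.mem_filter]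
  constructor
  · rintro ⟨rt, ⟨hrt, hby⟩, rfl⟩
    exact ⟨rt, hrt, rfl, by simpa using hby⟩
  · rintro ⟨rt, hrt, rfl, h2⟩
    exact ⟨rt, ⟨hrt, by simp [h2]⟩, rfl⟩

lemma ridsOf_cons_ne {r : Int} {t y : List String} {g' : List (Int × List String)}
    (h : y ≠ t) : ridsOf ((r, t) :: g') y = ridsOf g' y := by
  simp [ridsOf, Ne.symm h]

lemma ridsOf_cons_self {r : Int} {t : List String} {g' : List (Int × List String)} :
    ridsOf ((r, t) :: g') t = r :: ridsOf g' t := by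
  simp [ridsOf]

lemma cgInner_nomatch (ri : Int) (ti : List String) :
    ∀ (g' : List (Int × List String)) (st : List (PySem.Set Int) × PySem.Set Int),
    ridsOf g' ti = [] → cgInner ri ti g' st = st := by
  intro g'
  induction g' with
  | nil => intro st _; rfl
  | cons rt rest ih =>
    intro st hms
    obtain ⟨rj, tj⟩ := rt
    have hne : (ti == tj) = false := by
      rw [Bool.eq_false_iff]
      intro he
      have : ridsOf ((rj, tj) :: rest) ti = rj :: ridsOf rest ti := by
        simp [ridsOf, (eq_of_beq he).symm]
      rw [this] at hms
      exact List.cons_ne_nil _ _ hms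
    have hms' : ridsOf rest ti = [] := by
      have : tj ≠ ti := fun h => by simp [h] at hne
      rwa [ridsOf_cons_ne (Ne.symm this)] at hms
    simp [cgInner, hne, ih st hms']

lemma outer_canon :
    ∀ (g : List (Int × List String)) (cs : List (List String × List Int)),
    Pre_compare_group g →
    (∀ p ∈ cs, ∀ rt ∈ g, rt.1 ∈ p.2 → 2 ≤ (ridsOf g rt.2).length → rt.2 = p.1) →
    (∀ p ∈ cs, ∀ rt ∈ g, rt.2 = p.1 → rt.1 ∈ p.2) →
    cgOuter g (renderCls cs) = renderCls (cs ++ canonNew g cs) := by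
  intro g
  induction g with
  | nil =>
    intro cs _ _ _
    simp [cgOuter, canonNew, toksOf, renderCls]
  | cons rt g' ih =>
    intro cs hpre hF hB
    obtain ⟨r, t⟩ := rt
    have hpre' : Pre_compare_group g' := pre_tail hpre
    have htoks : toksOf ((r, t) :: g') = t :: (toksOf g').filter (fun y => !(y == t)) := by
      simp [toksOf, PySem.Set.ofList_cons, PySem.Set.discard]
    have houter : cgOuter ((r, t) :: g') (renderCls cs) =
        cgOuter g' (cgInner r t g' (cs.map (·.2), (cs.map (·.2)).flatten)) := rfl
    have hF' : ∀ p ∈ cs, ∀ rt ∈ g', rt.1 ∈ p.2 → 2 ≤ (ridsOf g' rt.2).length → rt.2 = p.1 :=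
      fun p hp rt hrt hmem hlen =>
        hF p hp rt (by simp [hrt]) hmem (le_trans hlen ridsOf_len_mono)
    have hB' : ∀ p ∈ cs, ∀ rt ∈ g', rt.2 = p.1 → rt.1 ∈ p.2 :=
      fun p hp rt hrt h2 => hB p hp rt (by simp [hrt]) h2
    by_cases hcov : ∃ p ∈ cs, p.1 = t
    · -- covered token: the whole inner round is a no-op
      obtain ⟨p0, hp0, hp0t⟩ := hcov
      have hany : cs.any (fun p => p.1 == t) = true := by
        simp only [List.any_eq_true]
        exact ⟨p0, hp0, by simp [hp0t]⟩
      have hnoop : cgInner r t g' (cs.map (·.2), (cs.map (·.2)).flatten) =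
          (cs.map (·.2), (cs.map (·.2)).flatten) := by
        apply cgInner_noop
        intro rt hrt hrt2
        -- this match makes the token class of t have ≥ 2 records in (r,t)::g'
        have hmemrids : rt.1 ∈ ridsOf g' t := mem_ridsOf.mpr ⟨rt, hrt, rfl, hrt2⟩
        have hlenT : 2 ≤ (ridsOf ((r, t) :: g') t).length := by
          rw [ridsOf_cons_self]
          have := List.length_pos_iff.mpr (List.ne_nil_of_mem hmemrids)
          simp
          omega
        have h1 : ∀ q ∈ cs.map (·.2), (r ∈ q ∨ rt.1 ∈ q) → (r ∈ q ∧ rt.1 ∈ q) := by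
          intro q hq hor
          obtain ⟨p, hp, rfl⟩ := List.mem_map.mp hq
          have hkey : t = p.1 := by
            rcases hor with hmem | hmem
            · exact hF p hp (r, t) (by simp) hmem hlenT
            · exact hrt2 ▸ hF p hp rt (by simp [hrt]) hmem (hrt2 ▸ hlenT)
          exact ⟨hB p hp (r, t) (by simp) (show t = p.1 from hkey),
                 hB p hp rt (by simp [hrt]) (hrt2.trans hkey)⟩
        have hrp0 : r ∈ p0.2 := hB p0 hp0 (r, t) (by simp) hp0t.symm
        have hbp0 : rt.1 ∈ p0.2 := hB p0 hp0 rt (by simp [hrt]) (hrt2.trans hp0t.symm)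
        have h2 : ∃ q ∈ cs.map (·.2), r ∈ q := ⟨p0.2, List.mem_map.mpr ⟨p0, hp0, rfl⟩, hrp0⟩
        have hloop := uplLoop_noop h1 h2
        have hflat : ∀ x, x ∈ p0.2 → x ∈ (cs.map (·.2)).flatten := by
          intro x hx
          exact List.mem_flatten.mpr ⟨p0.2, List.mem_map.mpr ⟨p0, hp0, rfl⟩, hx⟩
        have hixsub : PySem.Set.update ((cs.map (·.2)).flatten) [r, rt.1] =
            (cs.map (·.2)).flatten := by
          apply update_subset
          intro x hx
          simp only [List.mem_cons, List.not_mem_nil, or_false] at hx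
          rcases hx with rfl | rfl
          exacts [hflat _ hrp0, hflat _ hbp0]
        simp [update_pairs_list, hloop, hixsub]
      have hcanon : canonNew ((r, t) :: g') cs = canonNew g' cs := by
        unfold canonNew
        rw [htoks, List.filter_cons]
        have hpredt : (!(cs.any (·.1 == t)) &&
            decide (2 ≤ (ridsOf ((r, t) :: g') t).length)) = false := by
          simp [hany]
        rw [if_neg (by simp [hpredt])]
        rw [List.filter_filter]
        have hflt : (toksOf g').filter
              (fun y => (!(cs.any (·.1 == y)) &&
                decide (2 ≤ (ridsOf ((r, t) :: g') y).length)) && !(y == t)) =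
            (toksOf g').filter
              (fun y => !(cs.any (·.1 == y)) && decide (2 ≤ (ridsOf g' y).length)) := by
          apply List.filter_congr
          intro y _
          by_cases hy : y = t
          · subst hy; simp [hany]
          · simp [hy, ridsOf_cons_ne hy]
        rw [hflt]
        apply List.map_congr_left
        intro y hy
        have hyt : y ≠ t := by
          intro rfl'
          have := (List.mem_filter.mp hy).2
          simp [rfl', hany] at this
        rw [ridsOf_cons_ne hyt]
      rw [houter, hnoop]
      have := ih cs hpre' hF' hB'
      rw [show (cs.map (·.2), (cs.map (·.2)).flatten) = renderCls cs from rfl, this, hcanon]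
    · -- uncovered token
      have hany : cs.any (fun p => p.1 == t) = false := by
        rw [Bool.eq_false_iff]
        intro hc
        obtain ⟨p, hp, hpt⟩ := List.any_eq_true.mp hc
        exact hcov ⟨p, hp, by simpa using hpt⟩
      have hnotkey : ∀ p ∈ cs, p.1 ≠ t := fun p hp h => hcov ⟨p, hp, h⟩
      by_cases hms : ridsOf g' t = []
      · rw [houter, cgInner_nomatch r t g' _ hms]
        have hcanon : canonNew ((r, t) :: g') cs = canonNew g' cs := by
          unfold canonNew
          rw [htoks, List.filter_cons]
          have hlen : ridsOf ((r, t) :: g') t = [r] := by rw [ridsOf_cons_self, hms]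
          rw [if_neg (by simp [hlen])]
          rw [List.filter_filter]
          have hflt : (toksOf g').filter
                (fun y => (!(cs.any (·.1 == y)) &&
                  decide (2 ≤ (ridsOf ((r, t) :: g') y).length)) && !(y == t)) =
              (toksOf g').filter
                (fun y => !(cs.any (·.1 == y)) && decide (2 ≤ (ridsOf g' y).length)) := by
            apply List.filter_congr
            intro y _
            by_cases hy : y = t
            · subst hy; simp [hms]
            · simp [hy, ridsOf_cons_ne hy]
          rw [hflt]
          apply List.map_congr_left
          intro y hy
          have hyt : y ≠ t := by
            intro rfl'
            have := (List.mem_filter.mp hy).2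
            simp [rfl', hms] at this
          rw [ridsOf_cons_ne hyt]
        have := ih cs hpre' hF' hB'
        rw [show (cs.map (·.2), (cs.map (·.2)).flatten) = renderCls cs from rfl, this, hcanon]
      · -- a new class is created
        have hlenT : 2 ≤ (ridsOf ((r, t) :: g') t).length := by
          rw [ridsOf_cons_self]
          have := List.length_pos_iff.mpr hms
          simp
          omega
        have hrout : ∀ q ∈ cs.map (·.2), r ∉ q := by
          intro q hq hmem
          obtain ⟨p, hp, rfl⟩ := List.mem_map.mp hq
          exact hnotkey p hp (hF p hp (r, t) (by simp) hmem hlenT).symm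
        have hnew : ∀ rt ∈ g', rt.2 = t → ∀ q ∈ cs.map (·.2), rt.1 ∉ q := by
          intro rt hrt hrt2 q hq hmem
          obtain ⟨p, hp, rfl⟩ := List.mem_map.mp hq
          exact hnotkey p hp
            (hrt2 ▸ hF p hp rt (by simp [hrt]) hmem (hrt2 ▸ hlenT)).symm
        have hcreate := cgInner_create r t g' (cs.map (·.2)) hnew hrout
        rw [houter, hcreate, if_neg hms]
        -- the new class is complete for the remaining records
        have hFnew : ∀ p ∈ cs ++ [(t, PySem.Set.ofList (r :: ridsOf g' t))],
            ∀ rt ∈ g', rt.1 ∈ p.2 → 2 ≤ (ridsOf g' rt.2).length → rt.2 = p.1 := by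
          intro p hp rt hrt hmem hlen
          rcases List.mem_append.mp hp with hp' | hp'
          · exact hF' p hp' rt hrt hmem hlen
          · simp only [List.mem_singleton] at hp'
            subst hp'
            simp only [PySem.Set.mem_ofList, List.mem_cons] at hmem
            by_contra hne2
            have hlen2 : 2 ≤ (ridsOf ((r, t) :: g') rt.2).length :=
              le_trans hlen ridsOf_len_mono
            -- rt shares its id with a t-record, both classes have ≥ 2 records: Pre_ forbids it
            have hcontra : ∀ rt' ∈ ((r, t) :: g'), rt'.1 = rt.1 → rt'.2 = t → False := by
              intro rt' hrt' h1 h2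
              rcases hpre rt (by simp [hrt]) rt' hrt' h1.symm (by rw [h2]; exact hne2) with hc | hc
              · rw [← ridsOf_length] at hc; omega
              · rw [← ridsOf_length, h2] at hc; omega
            rcases hmem with hx | hx
            · exact hcontra (r, t) (by simp) hx.symm rfl
            · obtain ⟨rt', hrt', h1, h2⟩ := mem_ridsOf.mp hx
              exact hcontra rt' (by simp [hrt']) h1 h2
        have hBnew : ∀ p ∈ cs ++ [(t, PySem.Set.ofList (r :: ridsOf g' t))],
            ∀ rt ∈ g', rt.2 = p.1 → rt.1 ∈ p.2 := by
          intro p hp rt hrt h2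
          rcases List.mem_append.mp hp with hp' | hp'
          · exact hB' p hp' rt hrt h2
          · simp only [List.mem_singleton] at hp'
            subst hp'
            simp only [PySem.Set.mem_ofList, List.mem_cons]
            exact Or.inr (mem_ridsOf.mpr ⟨rt, hrt, rfl, h2⟩)
        have hrec := ih (cs ++ [(t, PySem.Set.ofList (r :: ridsOf g' t))]) hpre' hFnew hBnew
        have hrender : (cs.map (·.2) ++ [PySem.Set.ofList (r :: ridsOf g' t)],
            (cs.map (·.2)).flatten ++ PySem.Set.ofList (r :: ridsOf g' t)) =
            renderCls (cs ++ [(t, PySem.Set.ofList (r :: ridsOf g' t))]) := by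
          simp [renderCls]
        rw [hrender, hrec]
        have hcanon : canonNew ((r, t) :: g') cs =
            (t, PySem.Set.ofList (r :: ridsOf g' t)) ::
              canonNew g' (cs ++ [(t, PySem.Set.ofList (r :: ridsOf g' t))]) := by
          unfold canonNew
          rw [htoks, List.filter_cons]
          have hpredt : (!(cs.any (·.1 == t)) &&
              decide (2 ≤ (ridsOf ((r, t) :: g') t).length)) = true := by
            simp [hany, hlenT]
          rw [if_pos (by simp [hpredt])]
          rw [List.map_cons, ridsOf_cons_self]
          congr 1
          rw [List.filter_filter]
          have hflt : (toksOf g').filter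
                (fun y => (!(cs.any (·.1 == y)) &&
                  decide (2 ≤ (ridsOf ((r, t) :: g') y).length)) && !(y == t)) =
              (toksOf g').filter
                (fun y => !((cs ++ [(t, PySem.Set.ofList (r :: ridsOf g' t))]).any (·.1 == y)) &&
                  decide (2 ≤ (ridsOf g' y).length)) := by
            apply List.filter_congr
            intro y _
            by_cases hy : y = t
            · subst hy; simp
            · simp [ridsOf_cons_ne hy, (show (y == t) = false by simp [hy]),
                (show (t == y) = false by simp [Ne.symm hy])]
          rw [hflt]
          apply List.map_congr_left
          intro y hy
          have hyt : y ≠ t := by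
            intro rfl'
            have := (List.mem_filter.mp hy).2
            simp [rfl'] at this
          rw [ridsOf_cons_ne hyt]
        rw [hcanon]
        simp

-- ---- B side ----

lemma buildDict_getD (t : List String) :
    ∀ (g : List (Int × List String)) (d : PySem.Dict (List String) (List Int)),
    (g.foldl (fun d rt => d.modify rt.2 [] (· ++ [rt.1])) d).getD t [] =
      d.getD t [] ++ ridsOf g t := by
  intro g
  induction g with
  | nil => intro d; simp [ridsOf]
  | cons rt g ih =>
    intro d
    obtain ⟨r, t'⟩ := rt
    rw [List.foldl_cons, ih, PySem.Dict.getD_modify]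
    by_cases ht : t = t'
    · subst ht
      rw [if_pos rfl, ridsOf_cons_self]
      simp
    · rw [if_neg ht, ridsOf_cons_ne ht]

lemma emitFold_split (vs : List (List Int)) :
    ∀ (ps : List (PySem.Set Int)) (ix : PySem.Set Int),
    vs.foldl
      (fun st rids =>
        if 2 ≤ rids.length then
          (st.1 ++ [PySem.Set.ofList rids], PySem.Set.update st.2 rids)
        else st) (ps, ix) =
      (ps ++ (vs.filter (fun v => decide (2 ≤ v.length))).map PySem.Set.ofList,
       (vs.filter (fun v => decide (2 ≤ v.length))).foldl PySem.Set.update ix) := by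
  induction vs with
  | nil => intro ps ix; simp
  | cons v vs ih =>
    intro ps ix
    by_cases hv : 2 ≤ v.length
    · simp [List.foldl_cons, hv, ih]
    · simp [List.foldl_cons, hv, ih]

lemma foldl_update_disjoint (g : List (Int × List String)) :
    ∀ (ts : List (List String)) (ix : PySem.Set Int),
    ts.Nodup →
    (∀ t ∈ ts, ∀ t' ∈ ts, t ≠ t' → ∀ x ∈ ridsOf g t, x ∉ ridsOf g t') →
    (∀ t ∈ ts, ∀ x ∈ ridsOf g t, x ∉ ix) →
    ts.foldl (fun ix t => PySem.Set.update ix (ridsOf g t)) ix =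
      ix ++ (ts.map (fun t => PySem.Set.ofList (ridsOf g t))).flatten := by
  intro ts
  induction ts with
  | nil => intro ix _ _ _; simp
  | cons t0 ts ih =>
    intro ix hnd hdisj hix
    have hstep : PySem.Set.update ix (ridsOf g t0) = ix ++ PySem.Set.ofList (ridsOf g t0) := by
      rw [PySem.Set.update_eq_append_filter]
      congr 1
      apply List.filter_eq_self.mpr
      intro x hx
      have hni : x ∉ ix := hix t0 (by simp) x ((PySem.Set.mem_ofList _ x).mp hx)
      simp [hni]
    rw [List.foldl_cons, hstep,
        ih (ix ++ PySem.Set.ofList (ridsOf g t0)) hnd.of_cons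
          (fun t ht t' ht' hne x hx => hdisj t (by simp [ht]) t' (by simp [ht']) hne x hx) ?hd]
    · simp
    case hd =>
      intro t ht x hx
      simp only [List.mem_append, PySem.Set.mem_ofList]
      rintro (hin | hin)
      · exact hix t (by simp [ht]) x hx hin
      · have hne : t ≠ t0 := by
          rintro rfl
          exact (List.nodup_cons.mp hnd).1 ht
        exact hdisj t (by simp [ht]) t0 (by simp) hne x hx hin

lemma alt_canon (g : List (Int × List String)) (h : Pre_compare_group g) :
    compare_group_alt g = renderCls (canonNew g []) := by
  have hkeys : (g.foldl (fun d rt => d.modify rt.2 [] (· ++ [rt.1]))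
      PySem.Dict.empty).keys = toksOf g := by
    rw [PySem.Dict.keys_foldl_modify_key g (fun rt => rt.2) [] (fun d rt => (· ++ [rt.1]))
        PySem.Dict.empty]
    simp [toksOf, PySem.Dict.keys_empty, PySem.Set.update_nil_left]
  have hnodup : (toksOf g).Nodup := PySem.Set.nodup_ofList _
  have hvals : (g.foldl (fun d rt => d.modify rt.2 [] (· ++ [rt.1]))
      PySem.Dict.empty).values = (toksOf g).map (fun t => ridsOf g t) := by
    rw [PySem.Dict.values_eq_map_keys _ (hkeys ▸ hnodup) [], hkeys]
    apply List.map_congr_left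
    intro t _
    rw [buildDict_getD t g PySem.Dict.empty, PySem.Dict.getD_empty]
    rfl
  have hcanon : canonNew g [] =
      ((toksOf g).filter (fun t => decide (2 ≤ (ridsOf g t).length))).map
        (fun t => (t, PySem.Set.ofList (ridsOf g t))) := by
    simp [canonNew]
  show (let d := g.foldl (fun d rt => d.modify rt.2 [] (· ++ [rt.1])) PySem.Dict.empty
        d.values.foldl
          (fun st rids =>
            if 2 ≤ rids.length then
              (st.1 ++ [PySem.Set.ofList rids], PySem.Set.update st.2 rids)
            else st)
          ([], PySem.Set.empty)) = renderCls (canonNew g [])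
  rw [show (PySem.Set.empty : PySem.Set Int) = [] from rfl]
  simp only [hvals]
  rw [emitFold_split]
  rw [List.filter_map, List.foldl_map]
  have hdisj : ∀ t ∈ (toksOf g).filter ((fun v => decide (2 ≤ v.length)) ∘ fun t => ridsOf g t),
      ∀ t' ∈ (toksOf g).filter ((fun v => decide (2 ≤ v.length)) ∘ fun t => ridsOf g t),
      t ≠ t' → ∀ x ∈ ridsOf g t, x ∉ ridsOf g t' := by
    intro t ht t' ht' hne x hx hx'
    have hlt : 2 ≤ (ridsOf g t).length := by
      have := (List.mem_filter.mp ht).2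
      simpa using this
    have hlt' : 2 ≤ (ridsOf g t').length := by
      have := (List.mem_filter.mp ht').2
      simpa using this
    obtain ⟨rt, hrt, h1, h2⟩ := mem_ridsOf.mp hx
    obtain ⟨rt', hrt', h1', h2'⟩ := mem_ridsOf.mp hx'
    rcases h rt hrt rt' hrt' (h1.trans h1'.symm) (by rw [h2, h2']; exact hne) with hc | hc
    · rw [← ridsOf_length, h2] at hc; omega
    · rw [← ridsOf_length, h2'] at hc; omega
  have hford := foldl_update_disjoint g
    ((toksOf g).filter ((fun v => decide (2 ≤ v.length)) ∘ fun t => ridsOf g t)) []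
    (hnodup.filter _) hdisj (by intro t _ x _ hx; simp at hx)
  rw [hford]
  rw [hcanon, renderCls]
  rw [List.map_map, List.map_map]
  rfl

-- ===== VERDICT (by name: the statement is the Claim_ definition above) =====
theorem compare_group_spec : Claim_equal_compare_group := by
  intro g _ hpre
  show compare_group g = compare_group_alt g
  have hA : compare_group g = renderCls (canonNew g []) := by
    have := outer_canon g [] hpre (by intro p hp; simp at hp)
    simpa [compare_group, renderCls, PySem.Set.empty] using this
  rw [hA, alt_canon g hpre]
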